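-- pv_equiv track=rewrite | github.com/andrewkittredge/cryptography_class_stuff | ascii_to_int.py | int_to_ascii
-- ===== SOURCE A (Python) =====
-- import math
--
-- def int_to_ascii(value):
--     result = ""
--     val = str(value)
--     for i in range(int(math.ceil(float(len(val)) / float(3)))):
--         end = len(val) - (i * 3);
--         start = end - 3;
--         if start < 0:
--             start = 0
--         result = chr(int(val[start:end])) + result
--     return result
-- ===== SOURCE B (Python) =====
-- def int_to_ascii(value):
--     def go(s):
--         if not s:
--             return ""
--         k = (len(s) - 1) % 3 + 1
--         return chr(int(s[:k])) + go(s[k:])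
--     return go(str(value))
-- ===== Notes on version B (the rewrite author's own statement) =====
-- stated objective: simpler
-- what changed: Replaces A's backward indexed loop (math.ceil chunk count, right-anchored slices with a clamped start, string prepending) by a forward structural recursion that peels a leading chunk of size (len(s)-1)%3+1 and builds the result left-to-right.
import Mathlib
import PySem

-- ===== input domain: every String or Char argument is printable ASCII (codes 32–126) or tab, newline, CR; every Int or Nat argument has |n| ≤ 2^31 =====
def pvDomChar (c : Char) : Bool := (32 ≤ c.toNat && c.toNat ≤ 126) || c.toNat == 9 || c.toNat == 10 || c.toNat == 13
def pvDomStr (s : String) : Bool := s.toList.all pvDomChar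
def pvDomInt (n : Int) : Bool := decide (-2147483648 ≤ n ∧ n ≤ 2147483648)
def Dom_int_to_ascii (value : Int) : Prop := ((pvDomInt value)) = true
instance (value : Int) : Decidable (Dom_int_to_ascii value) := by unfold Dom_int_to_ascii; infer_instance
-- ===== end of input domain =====

-- B is a forward structural recursion peeling a leading chunk of size (len-1)%3+1, replacing
-- A's backward indexed loop with ceil-counted right-anchored slices and string prepending (objective: simpler).

-- ===== PORT A =====
-- chr(int(chunk)): Char.ofNat of int(chunk); exact here since every chunk A takes from str(value)
-- has a value in 0..999 on the admitted inputs (value ≥ 0); '.getD 0' only totalizes int(), which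
-- never fails on these digit chunks.
def pvChunkA (val : List Char) (i : Int) : List Char :=
  let e : Int := (val.length : Int) - i * 3
  let s : Int := e - 3
  let s : Int := if s < 0 then 0 else s
  [Char.ofNat ((PySem.Int.ofChars? (PySem.List.slice val (some s) (some e))).getD 0).toNat]

-- int(math.ceil(float(len(val)) / float(3))) = (len+2)/3: exact here since len(str(value)) ≤ 11
-- on the domain, far below any float rounding.
def int_to_ascii (value : Int) : String :=
  let val : List Char := PySem.Int.toChars value
  let m : Nat := (val.length + 2) / 3
  let result : List Char :=
    (PySem.List.pyRange 0 (m : Int) 1).foldl (fun result i => pvChunkA val i ++ result) []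
  String.ofList result

-- ===== PORT B =====
-- go(s): chr(int(s[:k])) + go(s[k:]) with k = (len(s)-1)%3+1; s[:k]/s[k:] with 0 ≤ k are
-- List.take/List.drop, (len(s)-1)%3+1 on len(s) ≥ 1 is exact Nat arithmetic.
def pvGoB (s : List Char) : List Char :=
  if hs : s = [] then []
  else
    let k : Nat := (s.length - 1) % 3 + 1
    Char.ofNat ((PySem.Int.ofChars? (s.take k)).getD 0).toNat :: pvGoB (s.drop k)
termination_by s.length
decreasing_by
  have : s.length ≠ 0 := by simpa using hs
  simp [List.length_drop]; omega

def int_to_ascii_alt (value : Int) : String :=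
  String.ofList (pvGoB (PySem.Int.toChars value))

-- ===== PRECONDITION & SPEC =====
-- Python A raises ValueError on negative values (chr of a negative chunk); Pre_ admits exactly
-- the inputs on which A returns.
def Pre_int_to_ascii (value : Int) : Prop := 0 ≤ value
instance (value : Int) : Decidable (Pre_int_to_ascii value) := by unfold Pre_int_to_ascii; infer_instance
def pvWitness_int_to_ascii : Int := (1234567)

def Spec_int_to_ascii (value : Int) (out : String) : Prop := out = int_to_ascii_alt value
instance (value : Int) (out : String) : Decidable (Spec_int_to_ascii value out) := by unfold Spec_int_to_ascii; infer_instance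

-- ===== CLAIM (what is proved, stated in full; the proofs are below) =====
def Claim_equal_int_to_ascii : Prop := ∀ (value : Int), Dom_int_to_ascii value → Pre_int_to_ascii value → Spec_int_to_ascii value (int_to_ascii value)

-- ===== LEMMAS AND PROOFS =====

-- A's prepend-loop is the flatMap of the chunk bodies over the reversed index list.
theorem pvFoldlPrepend {α β : Type} (g : α → List β) (L : List α) (r : List β) :
    L.foldl (fun r i => g i ++ r) r = L.reverse.flatMap g ++ r := by
  induction L generalizing r with
  | nil => simp
  | cons a t ih => simp [List.foldl_cons, ih, List.flatMap_append]

theorem pvFlatMapCongr {α β : Type} (f g : α → List β) (L : List α)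
    (h : ∀ a ∈ L, f a = g a) : L.flatMap f = L.flatMap g := by
  induction L with
  | nil => rfl
  | cons a t ih =>
    simp only [List.flatMap_cons]
    rw [h a (by simp)]
    congr 1
    exact ih (fun x hx => h x (by simp [hx]))

-- the leftmost chunk A produces (iteration i = m-1) is B's leading chunk l.take k
theorem pvChunkA_top (l : List Char) (h : l.length ≠ 0) :
    pvChunkA l ((((l.length + 2) / 3 : Nat) : Int) - 1)
      = [Char.ofNat ((PySem.Int.ofChars? (l.take ((l.length - 1) % 3 + 1))).getD 0).toNat] := by
  simp only [pvChunkA]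
  set n := l.length with hn
  set k : Nat := (n - 1) % 3 + 1 with hk
  have he : (n : Int) - ((((n + 2) / 3 : Nat) : Int) - 1) * 3 = ((k : Nat) : Int) := by omega
  rw [he]
  have hif : (if ((k : Nat) : Int) - 3 < 0 then (0 : Int) else ((k : Nat) : Int) - 3)
      = (((0 : Nat)) : Int) := by
    split_ifs with h'
    · norm_num
    · omega
  rw [hif, PySem.List.slice_natCast]
  simp

-- every other chunk of l (i < m-1) is the corresponding chunk of l.drop k
theorem pvChunkA_rest (l : List Char) (i : Nat)
    (hi : i < (l.length + 2) / 3 - 1) :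
    pvChunkA l (i : Int) = pvChunkA (l.drop ((l.length - 1) % 3 + 1)) (i : Int) := by
  simp only [pvChunkA]
  set n := l.length with hn
  set k : Nat := (n - 1) % 3 + 1 with hk
  have hkn : k ≤ n := by omega
  have hbound : k + 3 * i + 3 ≤ n := by omega
  have hlen : (List.drop k l).length = n - k := by rw [List.length_drop]
  rw [hlen]
  have e1 : (n : Int) - (i : Int) * 3 = ((n - 3 * i : Nat) : Int) := by omega
  have e1' : ((n - k : Nat) : Int) - (i : Int) * 3 = ((n - k - 3 * i : Nat) : Int) := by omega
  rw [e1, e1']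
  have e2 : ((n - 3 * i : Nat) : Int) - 3 = ((n - 3 * i - 3 : Nat) : Int) := by omega
  have e2' : ((n - k - 3 * i : Nat) : Int) - 3 = ((n - k - 3 * i - 3 : Nat) : Int) := by omega
  rw [e2, e2']
  have hneg : ¬ (((n - 3 * i - 3 : Nat) : Int) < 0) := not_lt.mpr (Int.natCast_nonneg _)
  have hneg' : ¬ (((n - k - 3 * i - 3 : Nat) : Int) < 0) := not_lt.mpr (Int.natCast_nonneg _)
  rw [if_neg hneg, if_neg hneg', PySem.List.slice_natCast, PySem.List.slice_natCast,
    List.drop_drop]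
  have h1 : k + (n - k - 3 * i - 3) = n - 3 * i - 3 := by omega
  have h2 : n - k - 3 * i - (n - k - 3 * i - 3) = n - 3 * i - (n - 3 * i - 3) := by omega
  rw [h1, h2]

-- main list-level fact: A's chunk sequence (left to right) is exactly B's recursion, on EVERY list
theorem pvAB (l : List Char) :
    (List.range ((l.length + 2) / 3)).reverse.flatMap
        (fun (i : Nat) => pvChunkA l (i : Int)) = pvGoB l := by
  generalize hN : l.length = N
  induction N using Nat.strong_induction_on generalizing l with
  | _ N ih =>
    subst hN
    rw [pvGoB]
    by_cases hnil : l = []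
    · subst hnil; simp
    · simp only [dif_neg hnil]
      have hlen0 : l.length ≠ 0 := by simpa using hnil
      set n := l.length with hn
      set k : Nat := (n - 1) % 3 + 1 with hk
      set m : Nat := (n + 2) / 3 with hm
      have hm1 : 1 ≤ m := by omega
      have hrange : List.range m = List.range (m - 1) ++ [m - 1] := by
        conv_lhs => rw [show m = (m - 1) + 1 by omega]
        rw [List.range_succ]
      rw [hrange]
      simp only [List.reverse_append, List.reverse_singleton, List.singleton_append,
        List.flatMap_cons]
      have htop := pvChunkA_top l hlen0
      have hcast : ((m - 1 : Nat) : Int) = (((l.length + 2) / 3 : Nat) : Int) - 1 := by omega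
      rw [hcast, htop]
      have hdroplen : (List.drop k l).length = n - k := by rw [List.length_drop]
      have hm' : ((List.drop k l).length + 2) / 3 = m - 1 := by rw [hdroplen]; omega
      have hrest : (List.range (m - 1)).reverse.flatMap (fun (i : Nat) => pvChunkA l (i : Int))
          = (List.range (((List.drop k l).length + 2) / 3)).reverse.flatMap
              (fun (i : Nat) => pvChunkA (List.drop k l) (i : Int)) := by
        rw [hm']
        apply pvFlatMapCongr
        intro i hi
        have hi' : i < m - 1 := List.mem_range.mp (List.mem_reverse.mp hi)
        exact pvChunkA_rest l i (by omega)
      rw [List.singleton_append, hrest,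
        ih (List.drop k l).length (by rw [List.length_drop]; omega) (List.drop k l) rfl]

-- ===== VERDICT (by name: the statement is the Claim_ definition above) =====
theorem int_to_ascii_spec : Claim_equal_int_to_ascii := by
  intro value _ _
  show int_to_ascii value = int_to_ascii_alt value
  simp only [int_to_ascii, int_to_ascii_alt]
  congr 1
  rw [PySem.List.pyRange_zero_natCast, List.foldl_map,
    pvFoldlPrepend (fun (i : Nat) => pvChunkA (PySem.Int.toChars value) (i : Int)),
    List.append_nil]
  exact pvAB (PySem.Int.toChars value)
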